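-- pv_equiv track=rewrite | github.com/teabolt/dcu_case_1721 | year1_1718/computer_programming_2/scripts/20180722180629/2018-02-28/qnou_041.py | qnou
-- ===== SOURCE A (Python) =====
-- def find_all(s, c):
--     """Return a list of all the indices that have a character 'c' in the string 's'."""
--     indices = []
--     i = s.find(c)
--     while i != -1:
--         indices.append(i)
--         i = s.find(c, i+1)
--     return indices
--
-- def qnou(s):
--     """Return True if string s contains *a* 'q' that is not followed by a 'u', otherwise False."""
--     all_q = find_all(s, 'q')
--     for i in all_q:
--         if i == len(s)-1:
--             return True
--         elif s[i+1] != 'u':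
--             return True
--     return False
-- ===== SOURCE B (Python) =====
-- def qnou(s):
--     """Return True if string s contains a 'q' that is not followed by a 'u', otherwise False."""
--     prev = None
--     for c in s:
--         if prev == 'q' and c != 'u':
--             return True
--         prev = c
--     return prev == 'q'
-- ===== Notes on version B (the rewrite author's own statement) =====
-- stated objective: simpler
-- what changed: Replaces find_all's repeated str.find scans plus an index list and a second loop with one single pass over the characters that tracks only the previous character.
import Mathlib
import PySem

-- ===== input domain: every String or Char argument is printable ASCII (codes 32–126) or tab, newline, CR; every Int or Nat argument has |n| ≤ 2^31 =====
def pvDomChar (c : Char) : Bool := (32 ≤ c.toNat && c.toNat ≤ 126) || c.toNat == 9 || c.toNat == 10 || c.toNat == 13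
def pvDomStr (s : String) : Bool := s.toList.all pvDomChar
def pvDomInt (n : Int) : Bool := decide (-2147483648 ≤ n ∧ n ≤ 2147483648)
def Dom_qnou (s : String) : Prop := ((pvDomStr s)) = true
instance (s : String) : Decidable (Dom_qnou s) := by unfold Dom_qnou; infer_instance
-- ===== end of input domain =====

-- B replaces find_all's repeated str.find scans + index list + second loop by one
-- single pass that tracks only the previous character (objective: simpler; same O(n) cost).

-- ===== PORT A =====
-- while-loop of find_all: i strictly increases each step, so |s|+1 fuel is enough
def findAllGo (s c : List Char) : Nat → Int → List Int
  | 0, _ => []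
  | fuel + 1, i =>
    if i = -1 then []
    else i :: findAllGo s c fuel (PySem.Chars.findFrom s c (i + 1) none)

def findAll (s c : String) : List Int :=
  findAllGo s.toList c.toList (s.toList.length + 1) (PySem.Chars.find s.toList c.toList)

-- the for-loop of qnou over all_q
def qnouGo (t : List Char) : List Int → Bool
  | [] => false
  | i :: rest =>
    if i = (t.length : Int) - 1 then true
    else
      match PySem.List.pyGet? t (i + 1) with
      | some ch => if ch ≠ 'u' then true else qnouGo t rest
      | none => false  -- unreachable: i is a valid 'q' index with i ≠ len-1, so i+1 is in range

def qnou (s : String) : Bool := qnouGo s.toList (findAll s "q")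

-- ===== PORT B =====
def qnouAltGo : List Char → Option Char → Bool
  | [], prev => prev == some 'q'
  | c :: rest, prev => if prev == some 'q' && c != 'u' then true else qnouAltGo rest (some c)

def qnou_alt (s : String) : Bool := qnouAltGo s.toList none

-- ===== PRECONDITION & SPEC =====
def Spec_qnou (s : String) (out : Bool) : Prop := out = qnou_alt s
instance (s : String) (out : Bool) : Decidable (Spec_qnou s out) := by unfold Spec_qnou; infer_instance

-- ===== CLAIM (what is proved, stated in full; the proofs are below) =====
def Claim_equal_qnou : Prop := ∀ (s : String), Dom_qnou s → Spec_qnou s (qnou s)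

-- ===== LEMMAS AND PROOFS =====

-- "some 'q' at index ≥ k not followed by 'u'"
def HasQ (t : List Char) (k : Nat) : Prop :=
  ∃ i, k ≤ i ∧ i < t.length ∧ t[i]? = some 'q' ∧ (i + 1 = t.length ∨ t[i + 1]? ≠ some 'u')

theorem singleton_prefix_drop (t : List Char) (a : Char) (i : Nat) :
    [a] <+: t.drop i ↔ t[i]? = some a := by
  rw [← List.head?_drop]
  cases h : (t.drop i) with
  | nil => simp [List.prefix_iff_eq_take]
  | cons b l =>
    simp only [List.head?_cons]
    constructor
    · rintro ⟨r, hr⟩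
      simp only [List.singleton_append] at hr
      cases hr; rfl
    · rintro hb; cases hb; exact ⟨l, rfl⟩

theorem singleton_infix_iff (t : List Char) (a : Char) : [a] <:+: t ↔ a ∈ t := by
  constructor
  · rintro ⟨p, q, hpq⟩
    subst hpq; simp
  · intro h
    obtain ⟨p, q, hpq⟩ := List.append_of_mem h
    exact ⟨p, q, by simp [hpq]⟩

theorem mem_drop_iff_hasIdx (t : List Char) (k : Nat) (a : Char) :
    a ∈ t.drop k ↔ ∃ i, k ≤ i ∧ t[i]? = some a := by
  rw [List.mem_iff_getElem?]
  constructor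
  · rintro ⟨j, hj⟩
    exact ⟨k + j, Nat.le_add_right _ _, by rwa [List.getElem?_drop] at hj⟩
  · rintro ⟨i, hki, hi⟩
    exact ⟨i - k, by rw [List.getElem?_drop]; rwa [Nat.add_sub_cancel' hki]⟩

-- main invariant for port A's composed loops
theorem qnouGo_findAllGo (fuel : Nat) :
    ∀ (t : List Char) (k : Nat), k ≤ t.length → t.length - k < fuel →
      (qnouGo t (findAllGo t ['q'] fuel (PySem.Chars.findFrom t ['q'] (k : Int) none)) = true
        ↔ HasQ t k) := by
  induction fuel with
  | zero => intro t k hk hfuel; omega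
  | succ fuel ih =>
    intro t k hk hfuel
    by_cases hneg : PySem.Chars.findFrom t ['q'] (k : Int) none = -1
    · rw [hneg, show findAllGo t ['q'] (fuel + 1) (-1) = [] from by simp [findAllGo]]
      rw [PySem.Chars.findFrom_natCast_eq_neg_one_iff t ['q'] k hk] at hneg
      rw [singleton_infix_iff, mem_drop_iff_hasIdx] at hneg
      constructor
      · intro h; simp [qnouGo] at h
      · rintro ⟨i, hki, _, hq, _⟩; exact absurd ⟨i, hki, hq⟩ hneg
    · obtain ⟨hge, hpre, hmin⟩ := PySem.Chars.findFrom_natCast_spec t ['q'] k hk hneg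
      set m : Int := PySem.Chars.findFrom t ['q'] (k : Int) none with hm
      have h0m : 0 ≤ m := le_trans (Int.natCast_nonneg k) hge
      rw [singleton_prefix_drop] at hpre
      have hmn : m.toNat < t.length := by
        by_contra hc
        rw [List.getElem?_eq_none (by omega)] at hpre
        simp at hpre
      have hkm : k ≤ m.toNat := by omega
      rw [findAllGo, if_neg hneg]
      rw [qnouGo]
      by_cases hlast : m = (t.length : Int) - 1
      · rw [if_pos hlast]
        constructor
        · intro _
          exact ⟨m.toNat, hkm, hmn, hpre, Or.inl (by omega)⟩
        · intro _; rfl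
      · rw [if_neg hlast]
        have hm1 : m.toNat + 1 < t.length := by omega
        have hget : PySem.List.pyGet? t (m + 1) = some t[m.toNat + 1] := by
          have : m + 1 = ((m.toNat + 1 : Nat) : Int) := by omega
          rw [this, PySem.List.pyGet?_natCast, List.getElem?_eq_getElem hm1]
        rw [hget]
        show (if t[m.toNat + 1] ≠ 'u' then true
              else qnouGo t (findAllGo t ['q'] fuel (PySem.Chars.findFrom t ['q'] (m + 1) none)))
              = true ↔ HasQ t k
        by_cases hu : t[m.toNat + 1] = 'u'
        · rw [if_neg (by simpa using hu)]
          have hcast : m + 1 = ((m.toNat + 1 : Nat) : Int) := by omega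
          rw [hcast]
          rw [ih t (m.toNat + 1) (by omega) (by omega)]
          constructor
          · rintro ⟨i, hki, hi, hq, hc⟩
            exact ⟨i, by omega, hi, hq, hc⟩
          · rintro ⟨i, hki, hi, hq, hc⟩
            refine ⟨i, ?_, hi, hq, hc⟩
            rcases Nat.lt_or_ge i m.toNat with hlt | hge'
            · exfalso
              exact hmin i hki hlt ((singleton_prefix_drop t 'q' i).mpr hq)
            · rcases Nat.eq_or_lt_of_le hge' with heq | hgt
              · exfalso
                rcases hc with h1 | h2
                · omega
                · apply h2
                  rw [← heq, List.getElem?_eq_getElem hm1, hu]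
              · omega
        · rw [if_pos (by simpa using hu)]
          constructor
          · intro _
            exact ⟨m.toNat, hkm, hmn, hpre,
              Or.inr (by rw [List.getElem?_eq_getElem hm1]; simpa using hu)⟩
          · intro _; rfl

theorem qnouAltGo_iff (t : List Char) :
    ∀ prev : Option Char,
      (qnouAltGo t prev = true ↔ ((prev = some 'q' ∧ t.head? ≠ some 'u') ∨ HasQ t 0)) := by
  induction t with
  | nil =>
    intro prev
    simp only [qnouAltGo, HasQ]
    constructor
    · intro h; exact Or.inl ⟨by simpa using h, by simp⟩
    · rintro (⟨h, _⟩ | ⟨i, _, hi, _⟩)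
      · simp [h]
      · simp at hi
  | cons c rest ih =>
    intro prev
    have shift : HasQ (c :: rest) 0 ↔ ((c = 'q' ∧ rest.head? ≠ some 'u') ∨ HasQ rest 0) := by
      constructor
      · rintro ⟨i, _, hi, hq, hc⟩
        cases i with
        | zero =>
          left
          simp only [List.getElem?_cons_zero, Option.some.injEq] at hq
          refine ⟨hq, ?_⟩
          rcases hc with h1 | h2
          · have : rest = [] := by simpa using h1
            simp [this]
          · cases rest with
            | nil => simp
            | cons d l => simpa using h2
        | succ j =>
          right
          exact ⟨j, Nat.zero_le _, by simpa using hi, by simpa using hq,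
            by rcases hc with h1 | h2
               · left; simpa using h1
               · right; simpa using h2⟩
      · rintro (⟨hq, hu⟩ | ⟨j, _, hj, hq, hc⟩)
        · refine ⟨0, Nat.zero_le _, by simp, by simpa using hq, ?_⟩
          cases rest with
          | nil => left; rfl
          | cons d l => right; simpa using hu
        · exact ⟨j + 1, Nat.zero_le _, by simpa using hj, by simpa using hq,
            by rcases hc with h1 | h2
               · left; simpa using h1
               · right; simpa using h2⟩
    rw [shift]
    simp only [qnouAltGo]
    by_cases hb : (prev == some 'q' && c != 'u') = true
    · rw [if_pos hb]
      simp only [Bool.and_eq_true, beq_iff_eq, bne_iff_ne] at hb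
      constructor
      · intro _
        exact Or.inl ⟨hb.1, by simpa using hb.2⟩
      · intro _; rfl
    · rw [if_neg hb, ih (some c)]
      simp only [Bool.and_eq_true, beq_iff_eq, bne_iff_ne, not_and_or, not_not] at hb
      constructor
      · rintro (⟨h1, h2⟩ | h)
        · injection h1 with h1
          exact Or.inr (Or.inl ⟨h1, h2⟩)
        · exact Or.inr (Or.inr h)
      · rintro (⟨h1, h2⟩ | ⟨h1, h2⟩ | h)
        · exfalso
          rcases hb with hb | hb
          · exact hb h1
          · exact h2 (by simp [hb])
        · exact Or.inl ⟨by simp [h1], h2⟩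
        · exact Or.inr h

theorem qnou_iff (s : String) : qnou s = true ↔ HasQ s.toList 0 := by
  unfold qnou findAll
  have hq : ("q" : String).toList = ['q'] := rfl
  rw [hq, ← PySem.Chars.findFrom_zero]
  have h0 : (0 : Int) = ((0 : Nat) : Int) := rfl
  rw [h0]
  exact qnouGo_findAllGo (s.toList.length + 1) s.toList 0 (Nat.zero_le _) (by omega)

theorem qnou_alt_iff (s : String) : qnou_alt s = true ↔ HasQ s.toList 0 := by
  unfold qnou_alt
  rw [qnouAltGo_iff s.toList none]
  constructor
  · rintro (⟨h, _⟩ | h)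
    · simp at h
    · exact h
  · exact Or.inr

-- ===== VERDICT (by name: the statement is the Claim_ definition above) =====
theorem qnou_spec : Claim_equal_qnou := by
  intro s _
  unfold Spec_qnou
  rw [Bool.eq_iff_iff, qnou_iff, qnou_alt_iff]
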